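-- pv_equiv track=rewrite | github.com/ga26oe/skiena-alg-design-manual | chapter3/3-45.py | pairmax
-- ===== SOURCE A (Python) =====
-- class Trie:
--
--     def __init__(self, parent=None):
--         self.parent = parent
--         self.children = {}
--         self.n = 0
--
--     def add(self, c):
--         return self.children.setdefault(c, Trie(self))
--
--     def letter(self, child):
--         for c in self.children:
--             if self.children[c] == child:
--                 return c
--         return None
--
--     def spell(self):
--         if self.parent:
--             return self.parent.spell() + self.parent.letter(self)
--         return ''
--
-- def wrap(text):
--     """iterates through text, yielding lowercase letter or single ' '"""
--     inword = False
--     for c in text: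
--         c = c.lower()
--         if ord(c) >= ord('a') and ord(c) <= ord('z'):
--             yield c
--             inword = True
--         else:
--             if inword:
--                 yield ' '
--             inword = False
--     if inword:
--         yield ' '
--
-- def pairmax(text):
--     """finds the word pair with maximum occurrence"""
--     root = word2 = Trie()
--     best = word1 = None
--     for c in wrap(text):
--         if c == ' ':
--             if word1:
--                 word2.n += 1
--                 if best is None or word2.n > best.n:
--                     best = word2
--                 word2 = word1.add(' ')
--                 word1 = root
--             else:
--                 word1 = root
--                 word2 = word2.add(' ')
--         else:
--             word2 = word2.add(c)
--             if word1:
--                 word1 = word1.add(c)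
--     return best.spell(), best.n
-- ===== SOURCE B (Python) =====
-- def pairmax(text):
--     """finds the word pair with maximum occurrence"""
--     words = []
--     cur = []
--     for c in text:
--         c = c.lower()
--         if 'a' <= c <= 'z':
--             cur.append(c)
--         else:
--             if cur:
--                 words.append(''.join(cur))
--                 cur = []
--     if cur:
--         words.append(''.join(cur))
--     counts = {}
--     best_pair, best_count = '', 0
--     for w1, w2 in zip(words, words[1:]):
--         pair = w1 + ' ' + w2
--         cnt = counts.get(pair, 0) + 1
--         counts[pair] = cnt
--         if cnt > best_count:
--             best_pair, best_count = pair, cnt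
--     return best_pair, best_count
-- ===== Notes on version B (the rewrite author's own statement) =====
-- stated objective: simpler
-- what changed: Replaces the trie of word-pair paths (character-by-character node insertion, parent-pointer spell-back of the answer) by a plain tokenizer plus a dict counting whole 'w1 w2' strings with a running strict-greater argmax; same first-to-reach-max tie-break.
import Mathlib
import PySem

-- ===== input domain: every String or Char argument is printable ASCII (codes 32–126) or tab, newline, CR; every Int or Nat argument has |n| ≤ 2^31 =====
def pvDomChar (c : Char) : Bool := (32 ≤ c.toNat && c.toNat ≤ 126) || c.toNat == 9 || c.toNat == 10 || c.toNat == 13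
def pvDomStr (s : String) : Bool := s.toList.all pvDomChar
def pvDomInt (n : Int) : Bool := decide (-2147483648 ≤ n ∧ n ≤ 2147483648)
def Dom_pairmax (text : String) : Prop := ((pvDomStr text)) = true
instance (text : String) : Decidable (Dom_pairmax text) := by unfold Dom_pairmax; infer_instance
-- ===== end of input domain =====

-- B replaces A's trie of word-pair paths by a tokenizer plus a dict counting whole "w1 w2"
-- strings with a running strict-greater argmax (objective: simpler). Python strings are
-- modelled as List Char internally (String.append is kernel-opaque); words contain only
-- ASCII letters, so this is exact on the domain.

-- shared character helpers: c.lower() and the letter test of wrap / of B's tokenizer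
def pvLow (c : Char) : Char := PySem.Chars.lowerChar c
def pvIsAl (c : Char) : Bool := 97 ≤ c.toNat && c.toNat ≤ 122   -- ord('a') ≤ ord(c) ≤ ord('z')

-- ===== PORT A =====
-- a Trie object = one arena slot: parent pointer, children dict, counter n
structure PvNode where
  parent : Option Nat
  children : PySem.Dict Char Nat
  n : Int
deriving DecidableEq, Repr

def pvNode0 : PvNode := ⟨none, PySem.Dict.empty, 0⟩
def pvNodeAt (a : List PvNode) (i : Nat) : PvNode := a.getD i pvNode0

-- Trie.add = children.setdefault(c, Trie(self)); object identity = arena index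
def pvAdd (a : List PvNode) (i : Nat) (c : Char) : List PvNode × Nat :=
  match (pvNodeAt a i).children.get? c with
  | some j => (a, j)
  | none =>
      (a.modify i (fun nd => { nd with children := nd.children.insert c a.length })
         ++ [⟨some i, PySem.Dict.empty, 0⟩], a.length)

-- Trie.letter = first key of parent's children whose value is the child
def pvLetter (a : List PvNode) (p i : Nat) : Option Char :=
  ((pvNodeAt a p).children.items.find? (fun kv => kv.2 == i)).map (·.1)

-- Trie.spell; fuel (= arena size at the call) only makes the parent walk total,
-- letter None (unreachable in A: every non-root node is its parent's child) ported as []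
def pvSpell (a : List PvNode) : Nat → Nat → List Char
  | 0, _ => []
  | fuel + 1, i =>
      match (pvNodeAt a i).parent with
      | none => []
      | some p => pvSpell a fuel p ++ ((pvLetter a p i).map ([·])).getD []

-- wrap(text) as the list of characters the generator yields
def pvWrapGo : List Char → Bool → List Char
  | [], inword => if inword then [' '] else []
  | c :: cs, inword =>
      let c := pvLow c
      if pvIsAl c then c :: pvWrapGo cs true
      else if inword then ' ' :: pvWrapGo cs false
      else pvWrapGo cs false

-- loop state: (arena, best, word1, word2); word1 = none ↔ Python's word1 is None
def pvStepA (st : List PvNode × Option Nat × Option Nat × Nat) (c : Char) :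
    List PvNode × Option Nat × Option Nat × Nat :=
  let (a, best, w1, w2) := st
  if c = ' ' then
    match w1 with
    | some i1 =>
        let a := a.modify w2 (fun nd => { nd with n := nd.n + 1 })
        let best :=
          match best with
          | none => some w2
          | some b => if (pvNodeAt a b).n < (pvNodeAt a w2).n then some w2 else some b
        let p := pvAdd a i1 ' '
        (p.1, best, some 0, p.2)
    | none =>
        let p := pvAdd a w2 ' '
        (p.1, best, some 0, p.2)
  else
    let p := pvAdd a w2 c
    match w1 with
    | some i1 =>
        let q := pvAdd p.1 i1 c
        (q.1, best, some q.2, p.2)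
    | none => (p.1, best, none, p.2)

def pairmax (text : String) : String × Int :=
  let st := (pvWrapGo text.toList false).foldl pvStepA ([pvNode0], none, none, 0)
  match st.2.1 with
  | some b => (String.mk (pvSpell st.1 st.1.length b), (pvNodeAt st.1 b).n)
  | none => ("", 0)   -- Python raises AttributeError here (best is None); excluded by Pre_pairmax

-- ===== PORT B =====
-- tokenizer of Source B: words/cur accumulators (words as List Char; ''.join at the end is mk)
def pvTokB : List Char → List (List Char) → List Char → List (List Char)
  | [], words, cur => if cur = [] then words else words ++ [cur]
  | c :: cs, words, cur =>
      let c := pvLow c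
      if pvIsAl c then pvTokB cs words (cur ++ [c])
      else if cur = [] then pvTokB cs words []
      else pvTokB cs (words ++ [cur]) []

-- one step of Source B's pair loop: bump the dict count, update the running argmax
def pvStepB (st : PySem.Dict (List Char) Int × List Char × Int) (p : List Char × List Char) :
    PySem.Dict (List Char) Int × List Char × Int :=
  let (counts, bp, bc) := st
  let pair := p.1 ++ ' ' :: p.2
  let cnt := counts.getD pair 0 + 1
  (counts.insert pair cnt, if bc < cnt then (pair, cnt) else (bp, bc))

def pairmax_alt (text : String) : String × Int :=
  let ws := pvTokB text.toList [] []
  let st := (ws.zip ws.tail).foldl pvStepB (PySem.Dict.empty, [], 0)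
  (String.mk st.2.1, st.2.2)

-- ===== PRECONDITION & SPEC =====
-- Pre_ = 'a letter, later a non-letter, later again a letter' = the text has at least two
-- words. On the excluded texts (fewer than two words) A RAISES AttributeError (best stays
-- None and best.spell() is called), so A returns no value there; B returns ("", 0).
def Pre_pairmax (text : String) : Prop :=
  List.Sublist [true, false, true] (text.toList.map (fun c => pvIsAl (pvLow c)))
instance (text : String) : Decidable (Pre_pairmax text) := by unfold Pre_pairmax; infer_instance
def pvWitness_pairmax : String := "a b"

def Spec_pairmax (text : String) (out : String × Int) : Prop := out = pairmax_alt text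
instance (text : String) (out : String × Int) : Decidable (Spec_pairmax text out) := by unfold Spec_pairmax; infer_instance

-- ===== CLAIM (what is proved, stated in full; the proofs are below) =====
def Claim_equal_pairmax : Prop := ∀ (text : String), Dom_pairmax text → Pre_pairmax text → Spec_pairmax text (pairmax text)


-- ===== LEMMAS AND PROOFS =====

-- ---------- basic char facts ----------
-- (proof-only) spec-level tokenizer: the words of the text
def pvWords : List Char → List Char → List (List Char)
  | [], cur => if cur = [] then [] else [cur]
  | c :: cs, cur =>
      let c := pvLow c
      if pvIsAl c then pvWords cs (cur ++ [c])
      else if cur = [] then pvWords cs []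
      else cur :: pvWords cs []


theorem pvAl_ne_space {c : Char} (h : pvIsAl c = true) : c ≠ ' ' := by
  intro hc; subst hc; simp [pvIsAl] at h

-- Pre_ in terms of the tokenizer: the sublist pattern holds iff there are ≥ 2 words
theorem pvSub_drop {a b : Bool} {p l : List Bool} (h : List.Sublist (a :: p) (b :: l)) (hne : a ≠ b) :
    List.Sublist (a :: p) l := by
  cases h with
  | cons _ h => exact h
  | cons₂ => exact absurd rfl hne

theorem pvWordsOne (cs : List Char) : ∀ cur,
    (cur = [] → (1 ≤ (pvWords cs []).length ↔ List.Sublist [true] (cs.map (fun c => pvIsAl (pvLow c))))) ∧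
    (cur ≠ [] → 1 ≤ (pvWords cs cur).length) := by
  induction cs with
  | nil =>
      intro cur
      refine ⟨fun _ => ?_, fun h => ?_⟩
      · simp [pvWords]
      · simp [pvWords, h]
  | cons c cs ih =>
      intro cur
      by_cases hal : pvIsAl (pvLow c) = true
      · refine ⟨fun _ => ?_, fun h => ?_⟩
        · rw [show pvWords (c :: cs) [] = pvWords cs [pvLow c] by simp [pvWords, hal]]
          have h1 := (ih [pvLow c]).2 (by simp)
          simp only [List.map_cons, hal]
          constructor
          · intro _
            exact (List.cons_sublist_cons).mpr (List.nil_sublist _)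
          · intro _; exact h1
        · rw [show pvWords (c :: cs) cur = pvWords cs (cur ++ [pvLow c]) by simp [pvWords, hal]]
          exact (ih (cur ++ [pvLow c])).2 (by simp)
      · have hal' : pvIsAl (pvLow c) = false := by simpa using hal
        refine ⟨fun _ => ?_, fun h => ?_⟩
        · rw [show pvWords (c :: cs) [] = pvWords cs [] by simp [pvWords, hal]]
          rw [(ih []).1 rfl]
          simp only [List.map_cons, hal']
          constructor
          · intro h1; exact List.Sublist.cons _ h1
          · intro h1; exact pvSub_drop h1 (by simp)
        · rw [show pvWords (c :: cs) cur = cur :: pvWords cs [] by simp [pvWords, hal, h]]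
          simp
theorem pvWordsTwo (cs : List Char) : ∀ cur,
    (cur = [] → (2 ≤ (pvWords cs []).length ↔
        List.Sublist [true, false, true] (cs.map (fun c => pvIsAl (pvLow c))))) ∧
    (cur ≠ [] → (2 ≤ (pvWords cs cur).length ↔
        List.Sublist [false, true] (cs.map (fun c => pvIsAl (pvLow c))))) := by
  induction cs with
  | nil =>
      intro cur
      refine ⟨fun _ => ?_, fun h => ?_⟩
      · simp [pvWords]
      · simp [pvWords, h]
  | cons c cs ih =>
      intro cur
      by_cases hal : pvIsAl (pvLow c) = true
      · refine ⟨fun _ => ?_, fun h => ?_⟩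
        · rw [show pvWords (c :: cs) [] = pvWords cs [pvLow c] by simp [pvWords, hal]]
          rw [(ih [pvLow c]).2 (by simp)]
          simp only [List.map_cons, hal]
          constructor
          · intro h1
            exact (List.cons_sublist_cons).mpr h1
          · intro h1
            cases h1 with
            | cons _ h1 => exact List.Sublist.trans (by decide) h1
            | cons₂ _ h1 => exact h1
        · rw [show pvWords (c :: cs) cur = pvWords cs (cur ++ [pvLow c]) by simp [pvWords, hal]]
          rw [(ih (cur ++ [pvLow c])).2 (by simp)]
          simp only [List.map_cons, hal]
          constructor
          · intro h1; exact List.Sublist.cons _ h1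
          · intro h1; exact pvSub_drop h1 (by simp)
      · have hal' : pvIsAl (pvLow c) = false := by simpa using hal
        refine ⟨fun _ => ?_, fun h => ?_⟩
        · rw [show pvWords (c :: cs) [] = pvWords cs [] by simp [pvWords, hal]]
          rw [(ih []).1 rfl]
          simp only [List.map_cons, hal']
          constructor
          · intro h1; exact List.Sublist.cons _ h1
          · intro h1; exact pvSub_drop h1 (by simp)
        · rw [show pvWords (c :: cs) cur = cur :: pvWords cs [] by simp [pvWords, hal, h]]
          simp only [List.length_cons, List.map_cons, hal']
          have h1 := (pvWordsOne cs []).1 rfl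
          constructor
          · intro h2
            have : 1 ≤ (pvWords cs []).length := by omega
            exact (List.cons_sublist_cons).mpr (h1.mp this)
          · intro h2
            have : List.Sublist [true] (cs.map (fun c => pvIsAl (pvLow c))) := by
              cases h2 with
              | cons _ h2 => exact ((List.sublist_cons_self false [true]).trans h2)
              | cons₂ _ h2 => exact h2
            have := h1.mpr this
            omega

-- ---------- tokenizers ----------
-- B's accumulator tokenizer is the spec tokenizer
theorem pvTokB_eq (cs : List Char) : ∀ acc cur, pvTokB cs acc cur = acc ++ pvWords cs cur := by
  induction cs with
  | nil => intro acc cur; by_cases h : cur = [] <;> simp [pvTokB, pvWords, h]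
  | cons c cs ih =>
      intro acc cur
      by_cases hal : pvIsAl (pvLow c) = true
      · simp only [pvTokB, pvWords, hal, if_true]
        exact ih acc (cur ++ [pvLow c])
      · by_cases h : cur = [] <;> simp [pvTokB, pvWords, hal, h, ih]

-- every word the tokenizer yields consists of letters
theorem pvWords_al (cs : List Char) : ∀ cur, (∀ c ∈ cur, pvIsAl c = true) →
    ∀ w ∈ pvWords cs cur, ∀ c ∈ w, pvIsAl c = true := by
  induction cs with
  | nil =>
      intro cur hcur w hw
      by_cases h : cur = []
      · simp [pvWords, h] at hw
      · simp only [pvWords, if_neg h, List.mem_singleton] at hw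
        subst hw; exact hcur
  | cons c cs ih =>
      intro cur hcur w hw
      by_cases hal : pvIsAl (pvLow c) = true
      · simp only [pvWords, hal, if_true] at hw
        refine ih (cur ++ [pvLow c]) ?_ w hw
        intro x hx
        rcases List.mem_append.mp hx with hx | hx
        · exact hcur x hx
        · rw [List.mem_singleton.mp hx]; exact hal
      · by_cases h : cur = []
        · rw [show pvWords (c :: cs) cur = pvWords cs [] by
            simp [pvWords, hal, h]] at hw
          exact ih [] (by simp) w hw
        · rw [show pvWords (c :: cs) cur = cur :: pvWords cs [] by
            simp [pvWords, hal, h]] at hw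
          rcases List.mem_cons.mp hw with hw | hw
          · subst hw; exact hcur
          · exact ih [] (by simp) w hw

-- wrap's stream is the words joined with one ' ' after each
theorem pvWrap_eq (cs : List Char) : ∀ cur,
    (pvWords cs cur).flatMap (· ++ [' ']) = cur ++ pvWrapGo cs (cur != []) := by
  induction cs with
  | nil => intro cur; by_cases h : cur = [] <;> simp [pvWords, pvWrapGo, h]
  | cons c cs ih =>
      intro cur
      by_cases hal : pvIsAl (pvLow c) = true
      · simp only [pvWords, pvWrapGo, hal, if_true]
        rw [ih (cur ++ [pvLow c])]
        have hne : ((cur ++ [pvLow c]) != []) = true := by simp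
        rw [hne]
        simp
      · by_cases h : cur = []
        · rw [show pvWords (c :: cs) cur = pvWords cs [] by simp [pvWords, hal, h],
            show pvWrapGo (c :: cs) (cur != []) = pvWrapGo cs false by simp [pvWrapGo, hal, h], h]
          simpa using ih []
        · rw [show pvWords (c :: cs) cur = cur :: pvWords cs [] by simp [pvWords, hal, h],
            show pvWrapGo (c :: cs) (cur != []) = ' ' :: pvWrapGo cs false by simp [pvWrapGo, hal, h]]
          simp only [List.flatMap_cons]
          rw [ih []]
          simp

-- ---------- spec-level pair fold ----------
def pvPairStr (p : List Char × List Char) : List Char := p.1 ++ ' ' :: p.2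
def pvPairs (ws : List (List Char)) : List (List Char) := (ws.zip ws.tail).map pvPairStr

def pvSpecFold : List (List Char) → List (List Char) → (List Char × Int) → (List Char × Int)
  | [], _, st => st
  | p :: l, seen, (bp, bc) =>
      let c : Int := (seen.count p : Int) + 1
      pvSpecFold l (seen ++ [p]) (if bc < c then (p, c) else (bp, bc))

theorem pvSpecFold_append (l1 l2 : List (List Char)) : ∀ seen st,
    pvSpecFold (l1 ++ l2) seen st = pvSpecFold l2 (seen ++ l1) (pvSpecFold l1 seen st) := by
  induction l1 with
  | nil => intro seen st; simp [pvSpecFold]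
  | cons p l1 ih =>
      intro seen st
      obtain ⟨bp, bc⟩ := st
      simp only [List.cons_append, pvSpecFold]
      rw [ih (seen ++ [p])]
      simp

theorem pvSpecFold_count (l : List (List Char)) : ∀ seen bp bc, bc = (seen.count bp : Int) →
    (pvSpecFold l seen (bp, bc)).2 = (((seen ++ l).count (pvSpecFold l seen (bp, bc)).1 : Nat) : Int) := by
  induction l with
  | nil => intro seen bp bc h; simpa [pvSpecFold] using h
  | cons p l ih =>
      intro seen bp bc h
      simp only [pvSpecFold]
      split
      · have := ih (seen ++ [p]) p ((seen.count p : Int) + 1)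
          (by simp [List.count_append])
        simpa [List.append_assoc] using this
      · rename_i hlt
        have hne : p ≠ bp := by
          intro he; subst he
          rw [h] at hlt; omega
        have := ih (seen ++ [p]) bp bc (by
          rw [h, List.count_append, List.count_singleton]
          have : ¬ (p = bp) := hne
          simp [this])
        simpa [List.append_assoc] using this

theorem pvSpecFold_mono (l : List (List Char)) : ∀ seen bp bc, bc ≤ (pvSpecFold l seen (bp, bc)).2 := by
  induction l with
  | nil => intro seen bp bc; simp [pvSpecFold]
  | cons p l ih =>
      intro seen bp bc
      simp only [pvSpecFold]
      split
      · rename_i hlt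
        exact le_trans (le_of_lt hlt) (ih (seen ++ [p]) p _)
      · exact ih (seen ++ [p]) bp bc

theorem pvSpecFold_pos (l : List (List Char)) (h : l ≠ []) :
    1 ≤ (pvSpecFold l [] ([], 0)).2 := by
  cases l with
  | nil => exact absurd rfl h
  | cons p l =>
      simp only [pvSpecFold, List.count_nil, Nat.cast_zero, List.nil_append]
      norm_num
      exact pvSpecFold_mono l [p] p 1

theorem pvPairs_ne {ws : List (List Char)} (h : 2 ≤ ws.length) : pvPairs ws ≠ [] := by
  match ws, h with
  | a :: b :: t, _ => simp [pvPairs]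

theorem pvPairs_append {ws : List (List Char)} {w v} (h : ws.getLast? = some w) :
    pvPairs (ws ++ [v]) = pvPairs ws ++ [pvPairStr (w, v)] := by
  induction ws generalizing w with
  | nil => simp at h
  | cons x ws ih =>
      cases ws with
      | nil =>
          simp at h; subst h
          simp [pvPairs]
      | cons y t =>
          have hy : (y :: t).getLast? = some w := by
            rw [← h]; exact (List.getLast?_cons_cons ..).symm
          have hx : ∀ v', pvPairs (x :: y :: t ++ v') = pvPairStr (x, y) :: pvPairs (y :: t ++ v') := by
            intro v'; simp [pvPairs]
          have hx0 : pvPairs (x :: y :: t) = pvPairStr (x, y) :: pvPairs (y :: t) := by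
            simp [pvPairs]
          have hih := ih hy
          simp only [List.cons_append, hx, List.cons_append] at *
          rw [hih, hx0]
          simp

-- ---------- B's fold computes the spec fold ----------
theorem pvFoldB (l : List (List Char × List Char)) :
    ∀ (d : PySem.Dict (List Char) Int) (seen : List (List Char)) (bp : List Char) (bc : Int),
    (∀ t, d.getD t 0 = (seen.count t : Int)) →
    (l.foldl pvStepB (d, bp, bc)).2 = pvSpecFold (l.map pvPairStr) seen (bp, bc) := by
  induction l with
  | nil => intro d seen bp bc _; simp [pvSpecFold]
  | cons p l ih =>
      intro d seen bp bc hd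
      simp only [List.foldl_cons, List.map_cons, pvSpecFold, pvStepB]
      rw [show (p.1 ++ ' ' :: p.2) = pvPairStr p from rfl, hd (pvPairStr p)]
      have hdn : ∀ t, (d.insert (pvPairStr p) ((seen.count (pvPairStr p) : Int) + 1)).getD t 0
          = (((seen ++ [pvPairStr p]).count t : Nat) : Int) := by
        intro t
        rw [PySem.Dict.getD_insert]
        by_cases ht : t = pvPairStr p
        · simp [ht, List.count_append]
        · rw [if_neg ht, hd t, List.count_append, List.count_singleton]
          have : ¬ (pvPairStr p = t) := fun he => ht he.symm
          simp [this]
      split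
      · exact ih _ (seen ++ [pvPairStr p]) _ _ hdn
      · exact ih _ (seen ++ [pvPairStr p]) _ _ hdn

-- ---------- trie: paths, well-formedness ----------
def pvPath (a : List PvNode) : Nat → List Char → Option Nat
  | i, [] => some i
  | i, c :: s =>
      match (pvNodeAt a i).children.get? c with
      | some j => pvPath a j s
      | none => none

def pvNOf (a : List PvNode) (t : List Char) : Int :=
  match pvPath a 0 t with
  | some k => (pvNodeAt a k).n
  | none => 0

structure PvWF (a : List PvNode) : Prop where
  ne : a ≠ []
  root : (pvNodeAt a 0).parent = none
  nodup : ∀ k, (pvNodeAt a k).children.keys.Nodup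
  child_lt : ∀ i c j, i < a.length → (pvNodeAt a i).children.get? c = some j →
      i < j ∧ j < a.length ∧ (pvNodeAt a j).parent = some i ∧ pvLetter a i j = some c

theorem pvPath_lt {a : List PvNode} (hWF : PvWF a) (s : List Char) :
    ∀ i k, i < a.length → pvPath a i s = some k → i ≤ k ∧ k < a.length := by
  induction s with
  | nil => intro i k hi h; simp [pvPath] at h; omega
  | cons c s ih =>
      intro i k hi h
      simp only [pvPath] at h
      cases hg : (pvNodeAt a i).children.get? c with
      | none => rw [hg] at h; simp at h
      | some j =>
          rw [hg] at h
          obtain ⟨hij, hj, _, _⟩ := hWF.child_lt i c j hi hg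
          have := ih j k hj h
          omega

theorem pvPath_append (a : List PvNode) (s : List Char) (c : Char) : ∀ i,
    pvPath a i (s ++ [c]) = (pvPath a i s).bind (fun j => (pvNodeAt a j).children.get? c) := by
  induction s with
  | nil =>
      intro i
      simp only [List.nil_append, pvPath, Option.bind_some]
      cases (pvNodeAt a i).children.get? c <;> simp [pvPath]
  | cons c' s ih =>
      intro i
      simp only [List.cons_append, pvPath]
      cases (pvNodeAt a i).children.get? c' <;> simp [ih]

theorem pvSpell_correct {a : List PvNode} (hWF : PvWF a) (s : List Char) :
    ∀ k, pvPath a 0 s = some k → ∀ f, k < f → pvSpell a f k = s := by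
  have h0 : 0 < a.length := List.length_pos_iff.mpr hWF.ne
  induction s using List.reverseRecOn with
  | nil =>
      intro k h f hf
      simp [pvPath] at h; subst h
      cases f with
      | zero => omega
      | succ f => simp [pvSpell, hWF.root]
  | append_singleton s c ih =>
      intro k h f hf
      rw [pvPath_append] at h
      cases hp : pvPath a 0 s with
      | none => rw [hp] at h; simp at h
      | some p =>
          rw [hp] at h
          simp only [Option.bind_some] at h
          have hplen := (pvPath_lt hWF s 0 p h0 hp).2
          obtain ⟨hpk, hk, hpar, hlet⟩ := hWF.child_lt p c k hplen h
          cases f with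
          | zero => omega
          | succ f =>
              simp only [pvSpell, hpar]
              rw [ih p hp f (by omega), hlet]
              simp

theorem pvPath_inj {a : List PvNode} (hWF : PvWF a) {s t : List Char} {k : Nat}
    (hs : pvPath a 0 s = some k) (ht : pvPath a 0 t = some k) : s = t := by
  rw [← pvSpell_correct hWF s k hs (k + 1) (by omega),
      ← pvSpell_correct hWF t k ht (k + 1) (by omega)]

-- ---------- arena access helpers ----------
theorem pvNodeAt_oob {a : List PvNode} {k : Nat} (h : a.length ≤ k) : pvNodeAt a k = pvNode0 := by
  unfold pvNodeAt; exact List.getD_eq_default _ _ h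

theorem pvNodeAt_modify (a : List PvNode) (i : Nat) (f : PvNode → PvNode) (k : Nat) :
    pvNodeAt (a.modify i f) k = if k = i ∧ k < a.length then f (pvNodeAt a k) else pvNodeAt a k := by
  unfold pvNodeAt
  rw [List.getD_eq_getElem?_getD, List.getD_eq_getElem?_getD, List.getElem?_modify]
  by_cases hk : k < a.length
  · rw [List.getElem?_eq_getElem hk]
    by_cases hik : k = i
    · subst hik; simp [hk]
    · have hik' : (i = k) = False := by
        simp only [eq_iff_iff, iff_false]
        exact fun h => hik h.symm
      simp [hik, hik', hk]
  · rw [List.getElem?_eq_none (by omega)]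
    simp [hk]

theorem pvNodeAt_append (a : List PvNode) (x : PvNode) (k : Nat) :
    pvNodeAt (a ++ [x]) k = if k < a.length then pvNodeAt a k else if k = a.length then x else pvNode0 := by
  unfold pvNodeAt
  by_cases hk : k < a.length
  · rw [List.getD_eq_getElem?_getD, List.getElem?_append_left hk, if_pos hk,
      List.getD_eq_getElem?_getD]
  · by_cases he : k = a.length
    · subst he
      rw [List.getD_eq_getElem?_getD, List.getElem?_append_right (le_refl _)]
      simp
    · rw [List.getD_eq_default _ _ (by simp; omega), if_neg hk, if_neg he]

-- paths only read the children dicts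
theorem pvPath_congr {a b : List PvNode}
    (h : ∀ k c, (pvNodeAt b k).children.get? c = (pvNodeAt a k).children.get? c) :
    ∀ t m, pvPath b m t = pvPath a m t := by
  intro t
  induction t with
  | nil => intro m; simp [pvPath]
  | cons c t ih =>
      intro m
      simp only [pvPath, h m c]
      cases (pvNodeAt a m).children.get? c <;> simp [ih]

-- ---------- effect of Trie.add ----------
theorem pvAdd_spec {a : List PvNode} (hWF : PvWF a) {i : Nat} (c : Char) {s : List Char}
    (hs : pvPath a 0 s = some i) :
    PvWF (pvAdd a i c).1 ∧
    a.length ≤ (pvAdd a i c).1.length ∧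
    pvPath (pvAdd a i c).1 0 (s ++ [c]) = some (pvAdd a i c).2 ∧
    (∀ m t k, pvPath a m t = some k → pvPath (pvAdd a i c).1 m t = some k) ∧
    (∀ t, pvNOf (pvAdd a i c).1 t = pvNOf a t) := by
  have h0 : 0 < a.length := List.length_pos_iff.mpr hWF.ne
  have hi : i < a.length := (pvPath_lt hWF s 0 i h0 hs).2
  cases hget : (pvNodeAt a i).children.get? c with
  | some j =>
      have he : pvAdd a i c = (a, j) := by unfold pvAdd; rw [hget]
      rw [he]
      refine ⟨hWF, le_refl _, ?_, fun m t k h => h, fun t => rfl⟩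
      rw [pvPath_append, hs]
      simp [hget]
  | none =>
      set A' : List PvNode :=
        a.modify i (fun nd => { nd with children := nd.children.insert c a.length })
          ++ [⟨some i, PySem.Dict.empty, 0⟩] with hA'
      have he : pvAdd a i c = (A', a.length) := by unfold pvAdd; rw [hget]
      have hiAl : i ≠ a.length := by omega
      have hlenA : A'.length = a.length + 1 := by simp [hA']
      have hnode : ∀ k, pvNodeAt A' k =
          if k = i then { pvNodeAt a i with children := (pvNodeAt a i).children.insert c a.length }
          else if k = a.length then ⟨some i, PySem.Dict.empty, 0⟩ else pvNodeAt a k := by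
        intro k
        rw [hA', pvNodeAt_append, pvNodeAt_modify, List.length_modify]
        by_cases hki : k = i
        · subst hki; simp [hi]
        · by_cases hkl : k = a.length
          · subst hkl; simp [hki]
          · by_cases hk : k < a.length
            · simp [hki, hkl, hk]
            · simp only [if_neg hk, if_neg hkl, if_neg hki]
              exact (pvNodeAt_oob (by omega)).symm
      have hcontains : (pvNodeAt a i).children.contains c = false := by
        rw [PySem.Dict.contains_eq_isSome_get?, hget]; rfl
      have hget2 : ∀ k c', (pvNodeAt A' k).children.get? c' =
          if k = i ∧ c' = c then some a.length else (pvNodeAt a k).children.get? c' := by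
        intro k c'
        rw [hnode k]
        by_cases hki : k = i
        · rw [if_pos hki]
          show ((pvNodeAt a i).children.insert c a.length).get? c' = _
          rw [PySem.Dict.get?_insert]
          by_cases hc : c' = c
          · rw [if_pos hc, if_pos ⟨hki, hc⟩]
          · rw [if_neg hc, if_neg (fun h => hc h.2), hki]
        · rw [if_neg hki]
          by_cases hkl : k = a.length
          · subst hkl
            rw [if_pos rfl, if_neg (fun h => hki h.1), pvNodeAt_oob (le_refl _)]
            rfl
          · rw [if_neg hkl, if_neg (fun h => hki h.1)]
      have hpar : ∀ k, (pvNodeAt A' k).parent =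
          if k = a.length then some i else (pvNodeAt a k).parent := by
        intro k
        rw [hnode k]
        by_cases hki : k = i
        · subst hki
          rw [if_pos rfl, if_neg hiAl]
        · rw [if_neg hki]
          by_cases hkl : k = a.length
          · rw [if_pos hkl, if_pos hkl]
          · rw [if_neg hkl, if_neg hkl]
      have hn : ∀ k, (pvNodeAt A' k).n = (pvNodeAt a k).n := by
        intro k
        rw [hnode k]
        by_cases hki : k = i
        · subst hki; rw [if_pos rfl]
        · by_cases hkl : k = a.length
          · subst hkl
            rw [if_neg hki, if_pos rfl, pvNodeAt_oob (le_refl _)]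
            rfl
          · rw [if_neg hki, if_neg hkl]
      have hvals : ∀ k c₀ j₀, (c₀, j₀) ∈ (pvNodeAt a k).children.items → j₀ ≠ a.length := by
        intro k c₀ j₀ hm
        by_cases hk : k < a.length
        · have hg := PySem.Dict.get?_of_mem_items _ hm (hWF.nodup k)
          have := (hWF.child_lt k c₀ j₀ hk hg).2.1
          omega
        · rw [pvNodeAt_oob (by omega)] at hm
          have : (pvNode0.children).items = [] := rfl
          rw [this] at hm
          exact absurd hm (List.not_mem_nil)
      have hitems : (pvNodeAt A' i).children.items
          = (pvNodeAt a i).children.items ++ [(c, a.length)] := by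
        rw [hnode i, if_pos rfl]
        exact PySem.Dict.items_insert_of_not_contains _ _ hcontains
      have hfind_old : ∀ k j', j' ≠ a.length → pvLetter A' k j' = pvLetter a k j' := by
        intro k j' hj'
        unfold pvLetter
        by_cases hki : k = i
        · subst hki
          rw [hitems, List.find?_append]
          have hbe : (a.length == j') = false := by
            simp only [beq_eq_false_iff_ne, ne_eq]
            exact fun h => hj' h.symm
          have hfn : (([(c, a.length)]).find? (fun kv => kv.2 == j')) = none := by
            simp only [List.find?_cons]
            rw [hbe]
            rfl
          rw [hfn, Option.or_none]
        · rw [hnode k, if_neg hki]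
          by_cases hkl : k = a.length
          · subst hkl
            rw [if_pos rfl, pvNodeAt_oob (le_refl _)]
            rfl
          · rw [if_neg hkl]
      have hletter_new : pvLetter A' i a.length = some c := by
        unfold pvLetter
        rw [hitems, List.find?_append]
        have h1 : ((pvNodeAt a i).children.items.find? (fun kv => kv.2 == a.length)) = none := by
          rw [List.find?_eq_none]
          intro kv hkv
          simp only [beq_iff_eq]
          exact hvals i kv.1 kv.2 hkv
        rw [h1]
        simp
      have hWF' : PvWF A' := by
        refine ⟨by simp [hA'], ?_, ?_, ?_⟩
        · rw [hpar 0, if_neg (by omega)]; exact hWF.root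
        · intro k
          rw [hnode k]
          by_cases hki : k = i
          · rw [if_pos hki]
            exact PySem.Dict.nodup_keys_insert _ _ _ (hWF.nodup i)
          · by_cases hkl : k = a.length
            · rw [if_neg hki, if_pos hkl]
              exact List.nodup_nil
            · rw [if_neg hki, if_neg hkl]
              exact hWF.nodup k
        · intro k c' j' hk hg2
          rw [hget2 k c'] at hg2
          by_cases hcase : k = i ∧ c' = c
          · rw [if_pos hcase] at hg2
            obtain rfl : a.length = j' := by injection hg2
            obtain ⟨rfl, rfl⟩ := hcase
            refine ⟨hi, by omega, ?_, hletter_new⟩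
            rw [hpar a.length, if_pos rfl]
          · rw [if_neg hcase] at hg2
            have hklt : k < a.length := by
              by_contra hnk
              rw [pvNodeAt_oob (by omega)] at hg2
              simp [pvNode0, PySem.Dict.get?_empty] at hg2
            obtain ⟨h1, h2, h3, h4⟩ := hWF.child_lt k c' j' hklt hg2
            refine ⟨h1, by omega, ?_, ?_⟩
            · rw [hpar j', if_neg (by omega)]; exact h3
            · rw [hfind_old k j' (by omega)]; exact h4
      have hpres : ∀ m t k, pvPath a m t = some k → pvPath A' m t = some k := by
        intro m t
        induction t generalizing m with
        | nil => intro k h; simpa [pvPath] using h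
        | cons c' t ih =>
            intro k h
            simp only [pvPath] at h ⊢
            cases hg : (pvNodeAt a m).children.get? c' with
            | none => rw [hg] at h; simp at h
            | some j₁ =>
                rw [hg] at h
                have hup : (pvNodeAt A' m).children.get? c' = some j₁ := by
                  rw [hget2]
                  by_cases hcase : m = i ∧ c' = c
                  · exfalso; obtain ⟨rfl, rfl⟩ := hcase; rw [hget] at hg; simp at hg
                  · rw [if_neg hcase]; exact hg
                rw [hup]
                exact ih j₁ k h
      have hnew : pvPath A' 0 (s ++ [c]) = some a.length := by
        rw [pvPath_append, hpres 0 s i hs]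
        simp only [Option.bind_some]
        rw [hget2]
        simp
      have hrev : ∀ t m k, pvPath A' m t = some k →
          (pvPath a m t = some k) ∨
          (∃ t', t = t' ++ [c] ∧ pvPath a m t' = some i ∧ k = a.length) := by
        intro t
        induction t with
        | nil => intro m k h; left; simpa [pvPath] using h
        | cons c' t ih =>
            intro m k h
            simp only [pvPath] at h
            by_cases hcase : m = i ∧ c' = c
            · rw [hget2, if_pos hcase] at h
              cases t with
              | nil =>
                  simp [pvPath] at h
                  right
                  exact ⟨[], by simp [hcase.2], by simp [pvPath, hcase.1], h.symm⟩
              | cons c'' t' =>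
                  exfalso
                  simp only [pvPath] at h
                  rw [hget2, if_neg (fun hx => hiAl hx.1.symm), pvNodeAt_oob (le_refl _)] at h
                  simp [pvNode0, PySem.Dict.get?_empty] at h
            · rw [hget2, if_neg hcase] at h
              cases hg : (pvNodeAt a m).children.get? c' with
              | none => rw [hg] at h; simp at h
              | some j₁ =>
                  rw [hg] at h
                  rcases ih j₁ k h with hl | ⟨t', rfl, hti, hk⟩
                  · left; simp [pvPath, hg, hl]
                  · right
                    exact ⟨c' :: t', rfl, by simp [pvPath, hg, hti], hk⟩
      have hnof : ∀ t, pvNOf A' t = pvNOf a t := by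
        intro t
        unfold pvNOf
        cases hp' : pvPath A' 0 t with
        | none =>
            cases hp : pvPath a 0 t with
            | none => rfl
            | some k => exact absurd ((hpres 0 t k hp).symm.trans hp') (by simp)
        | some k =>
            rcases hrev t 0 k hp' with hl | ⟨t', rfl, hti, rfl⟩
            · rw [hl]; exact hn k
            · rw [pvPath_append, hti]
              simp only [Option.bind_some]
              rw [hget, hn a.length, pvNodeAt_oob (le_refl _)]
              rfl
      rw [he]
      exact ⟨hWF', show a.length ≤ A'.length by omega, hnew, hpres, hnof⟩

-- ---------- effect of word2.n += 1 ----------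
theorem pvBump_spec {a : List PvNode} (hWF : PvWF a) {w2 : Nat} {s2 : List Char}
    (h2 : pvPath a 0 s2 = some w2) :
    PvWF (a.modify w2 (fun nd => { nd with n := nd.n + 1 })) ∧
    (∀ m t, pvPath (a.modify w2 (fun nd => { nd with n := nd.n + 1 })) m t = pvPath a m t) ∧
    (∀ t, pvNOf (a.modify w2 (fun nd => { nd with n := nd.n + 1 })) t
        = pvNOf a t + (if t = s2 then 1 else 0)) := by
  have h0 : 0 < a.length := List.length_pos_iff.mpr hWF.ne
  have hw2 : w2 < a.length := (pvPath_lt hWF s2 0 w2 h0 h2).2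
  set B := a.modify w2 (fun nd => { nd with n := nd.n + 1 }) with hB
  have hlen : B.length = a.length := by simp [hB]
  have hnode : ∀ k, pvNodeAt B k =
      if k = w2 then { pvNodeAt a w2 with n := (pvNodeAt a w2).n + 1 } else pvNodeAt a k := by
    intro k
    rw [hB, pvNodeAt_modify]
    by_cases hk : k = w2
    · rw [if_pos ⟨hk, hk ▸ hw2⟩, if_pos hk, hk]
    · rw [if_neg (fun h => hk h.1), if_neg hk]
  have hchd : ∀ k, (pvNodeAt B k).children = (pvNodeAt a k).children := by
    intro k
    rw [hnode k]
    by_cases hk : k = w2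
    · rw [if_pos hk, hk]
    · rw [if_neg hk]
  have hpar : ∀ k, (pvNodeAt B k).parent = (pvNodeAt a k).parent := by
    intro k
    rw [hnode k]
    by_cases hk : k = w2
    · rw [if_pos hk, hk]
    · rw [if_neg hk]
  have hpath : ∀ t m, pvPath B m t = pvPath a m t :=
    pvPath_congr (fun k c => by rw [hchd k])
  have hWF' : PvWF B := by
    refine ⟨?_, ?_, ?_, ?_⟩
    · rw [← List.length_pos_iff, hlen]; exact h0
    · rw [hpar 0]; exact hWF.root
    · intro k; rw [hchd k]; exact hWF.nodup k
    · intro i c j hi hg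
      rw [hlen] at hi
      rw [hchd i] at hg
      obtain ⟨h1, hlt, h3, h4⟩ := hWF.child_lt i c j hi hg
      refine ⟨h1, by omega, ?_, ?_⟩
      · rw [hpar j]; exact h3
      · unfold pvLetter at h4 ⊢
        rw [hchd i]
        exact h4
  refine ⟨hWF', fun m t => hpath t m, ?_⟩
  intro t
  unfold pvNOf
  rw [hpath t 0]
  cases hp : pvPath a 0 t with
  | none =>
      have hne : t ≠ s2 := fun he => by rw [he, h2] at hp; exact absurd hp (by simp)
      rw [if_neg hne]
      simp
  | some k =>
      show (pvNodeAt B k).n = (pvNodeAt a k).n + ite (t = s2) 1 0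
      rw [hnode k]
      by_cases hk : k = w2
      · subst hk
        have ht : t = s2 := pvPath_inj hWF hp h2
        rw [if_pos rfl, if_pos ht]
      · have hne : t ≠ s2 := by
          intro he
          rw [he, h2] at hp
          exact hk (Option.some.inj hp).symm
        rw [if_neg hk, if_neg hne]
        simp

-- ---------- the loop invariant at a word boundary ----------
structure PvInv (st : List PvNode × Option Nat × Option Nat × Nat)
    (done : List (List Char)) (w : List Char) : Prop where
  wf : PvWF st.1
  w1 : st.2.2.1 = some 0
  w2 : pvPath st.1 0 (w ++ [' ']) = some st.2.2.2
  cnt : ∀ t, pvNOf st.1 t = ((pvPairs done).count t : Int)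
  best : st.2.1 = if pvPairs done = [] then none
                  else pvPath st.1 0 (pvSpecFold (pvPairs done) [] ([], 0)).1

-- running the letters of a word (word1 set)
theorem pvRunWord (w : List Char) (hal : ∀ c ∈ w, pvIsAl c = true) :
    ∀ (a : List PvNode) (best : Option Nat) (i1 w2 : Nat) (s1 s2 : List Char),
    PvWF a → pvPath a 0 s1 = some i1 → pvPath a 0 s2 = some w2 →
    ∃ a' i1' w2', w.foldl pvStepA (a, best, some i1, w2) = (a', best, some i1', w2') ∧
      PvWF a' ∧ a.length ≤ a'.length ∧
      pvPath a' 0 (s1 ++ w) = some i1' ∧ pvPath a' 0 (s2 ++ w) = some w2' ∧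
      (∀ m t k, pvPath a m t = some k → pvPath a' m t = some k) ∧
      (∀ t, pvNOf a' t = pvNOf a t) := by
  induction w with
  | nil =>
      intro a best i1 w2 s1 s2 hWF h1 h2
      exact ⟨a, i1, w2, rfl, hWF, le_refl _, by simpa using h1, by simpa using h2,
        fun m t k h => h, fun t => rfl⟩
  | cons c w ih =>
      intro a best i1 w2 s1 s2 hWF h1 h2
      have hc : c ≠ ' ' := pvAl_ne_space (hal c (by simp))
      have hstep : pvStepA (a, best, some i1, w2) c =
          ((pvAdd (pvAdd a w2 c).1 i1 c).1, best, some (pvAdd (pvAdd a w2 c).1 i1 c).2,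
            (pvAdd a w2 c).2) := by
        simp [pvStepA, hc]
      obtain ⟨hWFp, hlenp, hnewp, hpresp, hnofp⟩ := pvAdd_spec hWF c h2
      have h1p : pvPath (pvAdd a w2 c).1 0 s1 = some i1 := hpresp 0 s1 i1 h1
      obtain ⟨hWFq, hlenq, hnewq, hpresq, hnofq⟩ := pvAdd_spec hWFp c h1p
      have h2q : pvPath (pvAdd (pvAdd a w2 c).1 i1 c).1 0 (s2 ++ [c]) = some (pvAdd a w2 c).2 :=
        hpresq 0 (s2 ++ [c]) (pvAdd a w2 c).2 hnewp
      obtain ⟨a', i1', w2', heq, hWF', hlen', hp1, hp2, hpres, hnof⟩ :=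
        ih (fun x hx => hal x (by simp [hx])) (pvAdd (pvAdd a w2 c).1 i1 c).1 best
          (pvAdd (pvAdd a w2 c).1 i1 c).2 (pvAdd a w2 c).2 (s1 ++ [c]) (s2 ++ [c])
          hWFq hnewq h2q
      refine ⟨a', i1', w2', ?_, hWF', ?_, ?_, ?_, ?_, ?_⟩
      · rw [List.foldl_cons, hstep]; exact heq
      · calc a.length ≤ (pvAdd a w2 c).1.length := hlenp
          _ ≤ (pvAdd (pvAdd a w2 c).1 i1 c).1.length := hlenq
          _ ≤ a'.length := hlen'
      · simpa using hp1
      · simpa using hp2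
      · intro m t k h
        exact hpres m t k (hpresq m t k (hpresp m t k h))
      · intro t
        rw [hnof t, hnofq t, hnofp t]

-- running the letters of the first word (word1 still None)
theorem pvRunWord0 (w : List Char) (hal : ∀ c ∈ w, pvIsAl c = true) :
    ∀ (a : List PvNode) (best : Option Nat) (w2 : Nat) (s2 : List Char),
    PvWF a → pvPath a 0 s2 = some w2 →
    ∃ a' w2', w.foldl pvStepA (a, best, none, w2) = (a', best, none, w2') ∧
      PvWF a' ∧ a.length ≤ a'.length ∧
      pvPath a' 0 (s2 ++ w) = some w2' ∧
      (∀ m t k, pvPath a m t = some k → pvPath a' m t = some k) ∧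
      (∀ t, pvNOf a' t = pvNOf a t) := by
  induction w with
  | nil =>
      intro a best w2 s2 hWF h2
      exact ⟨a, w2, rfl, hWF, le_refl _, by simpa using h2, fun m t k h => h, fun t => rfl⟩
  | cons c w ih =>
      intro a best w2 s2 hWF h2
      have hc : c ≠ ' ' := pvAl_ne_space (hal c (by simp))
      have hstep : pvStepA (a, best, none, w2) c =
          ((pvAdd a w2 c).1, best, none, (pvAdd a w2 c).2) := by
        simp [pvStepA, hc]
      obtain ⟨hWFp, hlenp, hnewp, hpresp, hnofp⟩ := pvAdd_spec hWF c h2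
      obtain ⟨a', w2', heq, hWF', hlen', hp2, hpres, hnof⟩ :=
        ih (fun x hx => hal x (by simp [hx])) (pvAdd a w2 c).1 best (pvAdd a w2 c).2
          (s2 ++ [c]) hWFp hnewp
      refine ⟨a', w2', ?_, hWF', le_trans hlenp hlen', ?_, ?_, ?_⟩
      · rw [List.foldl_cons, hstep]; exact heq
      · simpa using hp2
      · intro m t k h
        exact hpres m t k (hpresp m t k h)
      · intro t
        rw [hnof t, hnofp t]

-- the best-update of the space branch of pvStepA, as a named function (for the proofs)
def pvBestUpd (a : List PvNode) (best : Option Nat) (w2 : Nat) : Option Nat :=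
  match best with
  | none => some w2
  | some b => if (pvNodeAt a b).n < (pvNodeAt a w2).n then some w2 else some b

-- one further word from a boundary state keeps the invariant
theorem pvStepWordPair {st done w} (hInv : PvInv st done w) (v : List Char)
    (hv : ∀ c ∈ v, pvIsAl c = true) (hlast : done.getLast? = some w) :
    PvInv ((v ++ [' ']).foldl pvStepA st) (done ++ [v]) v := by
  obtain ⟨a, best, w1o, w2⟩ := st
  obtain ⟨hWF, hw1, hw2, hcnt, hbest⟩ := hInv
  simp only at hWF hw1 hw2 hcnt hbest
  subst hw1
  -- letters of v
  obtain ⟨a', i1', w2', heq, hWF', hlen', hp1, hp2, hpres, hnof⟩ :=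
    pvRunWord v hv a best 0 w2 [] (w ++ [' ']) hWF rfl hw2
  have hp1' : pvPath a' 0 v = some i1' := by simpa using hp1
  -- the completed pair string
  have hps : pvPairStr (w, v) = (w ++ [' ']) ++ v := by simp [pvPairStr]
  -- word2.n += 1
  obtain ⟨hWFb, hpathb, hnofb⟩ := pvBump_spec hWF' hp2
  set B := a'.modify w2' (fun nd => { nd with n := nd.n + 1 }) with hB
  have hp1B : pvPath B 0 v = some i1' := by rw [hpathb 0 v]; exact hp1'
  have hp2B : pvPath B 0 ((w ++ [' ']) ++ v) = some w2' := by rw [hpathb 0 _]; exact hp2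
  -- word2 = word1.add(' ')
  obtain ⟨hWF2, hlen2, hnew2, hpres2, hnof2⟩ := pvAdd_spec hWFb ' ' hp1B
  -- the folded state
  have hfold : (v ++ [' ']).foldl pvStepA (a, best, some 0, w2) =
      ((pvAdd B i1' ' ').1, pvBestUpd B best w2', some 0, (pvAdd B i1' ' ').2) := by
    rw [List.foldl_append, heq]
    show pvStepA (a', best, some i1', w2') ' ' = _
    cases best <;> simp [pvStepA, hB, pvBestUpd]
  rw [hfold]
  -- counts after this word
  have hcnt' : ∀ t, pvNOf (pvAdd B i1' ' ').1 t = ((pvPairs (done ++ [v])).count t : Int) := by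
    intro t
    rw [hnof2 t, hnofb t, hnof t, hcnt t, pvPairs_append hlast, List.count_append]
    by_cases ht : t = (w ++ [' ']) ++ v
    · rw [if_pos ht, ht, ← hps]
      simp
    · rw [if_neg ht]
      have : ¬ (t = pvPairStr (w, v)) := by rw [hps]; exact ht
      have hc1 : ([pvPairStr (w, v)].count t) = 0 := by
        simp [List.count_singleton]
        intro he; exact absurd he.symm this
      rw [hc1]
      simp
  -- the spec fold over the old pairs
  have hBCcnt : (pvSpecFold (pvPairs done) [] ([], 0)).2
      = (((pvPairs done).count (pvSpecFold (pvPairs done) [] ([], 0)).1 : Nat) : Int) := by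
    simpa using pvSpecFold_count (pvPairs done) [] [] 0 (by simp)
  -- value of the new pair's node after the bump
  have hnw2 : (pvNodeAt B w2').n = ((pvPairs done).count (pvPairStr (w, v)) : Int) + 1 := by
    have h1 : pvNOf B (pvPairStr (w, v)) = (pvNodeAt B w2').n := by
      unfold pvNOf
      rw [hps, hp2B]
    rw [← h1, hps, hnofb _, hnof _, hcnt _, if_pos rfl, ← hps]
  -- the spec fold over the new pairs
  have hspec : pvSpecFold (pvPairs (done ++ [v])) [] ([], 0) =
      (if (pvSpecFold (pvPairs done) [] ([], 0)).2 < ((pvPairs done).count (pvPairStr (w, v)) : Int) + 1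
       then (pvPairStr (w, v), ((pvPairs done).count (pvPairStr (w, v)) : Int) + 1)
       else pvSpecFold (pvPairs done) [] ([], 0)) := by
    rw [pvPairs_append hlast, pvSpecFold_append]
    obtain ⟨BP, BC⟩ := pvSpecFold (pvPairs done) [] ([], 0)
    simp [pvSpecFold]
  -- pairs (done ++ [v]) is nonempty
  have hpne : pvPairs (done ++ [v]) ≠ [] := by
    rw [pvPairs_append hlast]
    simp
  refine ⟨hWF2, rfl, hnew2, hcnt', ?_⟩
  show _ = if pvPairs (done ++ [v]) = [] then none
           else pvPath (pvAdd B i1' ' ').1 0 (pvSpecFold (pvPairs (done ++ [v])) [] ([], 0)).1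
  rw [if_neg hpne, hspec]
  have hnewpath : pvPath (pvAdd B i1' ' ').1 0 (pvPairStr (w, v)) = some w2' := by
    refine hpres2 0 _ _ ?_
    rw [hps]; exact hp2B
  by_cases hpd : pvPairs done = []
  · -- no pair yet: best is None, the new pair wins on both sides
    have hbn : best = none := by rw [hbest, if_pos hpd]
    rw [hbn]
    show some w2' = _
    rw [hpd]
    simp only [pvSpecFold, List.count_nil]
    rw [if_pos (by norm_num), hnewpath]
  · -- there is a best pair BP; its node b exists because its count is ≥ 1
    have hBC1 : 1 ≤ (pvSpecFold (pvPairs done) [] ([], 0)).2 := pvSpecFold_pos _ hpd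
    have hnofBP : pvNOf a (pvSpecFold (pvPairs done) [] ([], 0)).1
        = (pvSpecFold (pvPairs done) [] ([], 0)).2 := by
      rw [hcnt _, ← hBCcnt]
    obtain ⟨b, hb⟩ : ∃ b, pvPath a 0 (pvSpecFold (pvPairs done) [] ([], 0)).1 = some b := by
      cases hp : pvPath a 0 (pvSpecFold (pvPairs done) [] ([], 0)).1 with
      | some b => exact ⟨b, rfl⟩
      | none =>
          exfalso
          rw [show pvNOf a (pvSpecFold (pvPairs done) [] ([], 0)).1 = 0 from by
            unfold pvNOf; rw [hp]] at hnofBP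
          omega
    have hbs : best = some b := by rw [hbest, if_neg hpd, hb]
    rw [hbs]
    show (if (pvNodeAt B b).n < (pvNodeAt B w2').n then some w2' else some b) = _
    have hpBP : pvPath B 0 (pvSpecFold (pvPairs done) [] ([], 0)).1 = some b := by
      rw [hpathb 0 _]
      exact hpres 0 _ _ hb
    have hnb : (pvNodeAt B b).n = (pvSpecFold (pvPairs done) [] ([], 0)).2
        + (if (pvSpecFold (pvPairs done) [] ([], 0)).1 = pvPairStr (w, v) then 1 else 0) := by
      have h1 : pvNOf B (pvSpecFold (pvPairs done) [] ([], 0)).1 = (pvNodeAt B b).n := by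
        unfold pvNOf
        rw [hpBP]
      rw [← h1, hnofb _, hnof _, hcnt _, ← hBCcnt, hps]
    by_cases hbp : (pvSpecFold (pvPairs done) [] ([], 0)).1 = pvPairStr (w, v)
    · -- the best pair IS the new pair: both sides keep it, count one higher
      have hcc : ((pvPairs done).count (pvPairStr (w, v)) : Int)
          = (pvSpecFold (pvPairs done) [] ([], 0)).2 := by
        rw [hBCcnt, hbp]
      rw [if_pos (show (pvSpecFold (pvPairs done) [] ([], 0)).2
        < ((pvPairs done).count (pvPairStr (w, v)) : Int) + 1 from by omega)]
      have hA : ¬ ((pvNodeAt B b).n < (pvNodeAt B w2').n) := by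
        rw [hnb, hnw2, if_pos hbp]
        omega
      rw [if_neg hA, hnewpath]
      -- b = w2': both are the node of the same pair string
      have hbw : b = w2' := by
        have h2 := hpBP
        rw [hbp, hps, hp2B] at h2
        exact (Option.some.inj h2).symm
      rw [hbw]
    · -- different pairs: the same strict comparison decides on both sides
      have hcond : ((pvNodeAt B b).n < (pvNodeAt B w2').n)
          ↔ ((pvSpecFold (pvPairs done) [] ([], 0)).2
              < ((pvPairs done).count (pvPairStr (w, v)) : Int) + 1) := by
        rw [hnb, hnw2, if_neg hbp]
        omega
      by_cases hlt : (pvSpecFold (pvPairs done) [] ([], 0)).2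
          < ((pvPairs done).count (pvPairStr (w, v)) : Int) + 1
      · rw [if_pos hlt, if_pos (hcond.mpr hlt), hnewpath]
      · rw [if_neg hlt, if_neg (fun h => hlt (hcond.mp h)), hpres2 0 _ _ hpBP]

theorem pvRunWords (rest : List (List Char)) (hal : ∀ w ∈ rest, ∀ c ∈ w, pvIsAl c = true) :
    ∀ st done w, PvInv st done w → done.getLast? = some w →
    PvInv ((rest.flatMap (· ++ [' '])).foldl pvStepA st) (done ++ rest) (rest.getLastD w) := by
  induction rest with
  | nil => intro st done w hInv _; simpa using hInv
  | cons v rest ih =>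
      intro st done w hInv hlast
      have hInv' := pvStepWordPair hInv v (hal v (by simp)) hlast
      have hstep := ih (fun u hu => hal u (by simp [hu])) _ (done ++ [v]) v hInv'
        List.getLast?_concat
      rw [List.flatMap_cons, List.foldl_append, List.getLastD_cons,
        show done ++ v :: rest = (done ++ [v]) ++ rest by simp]
      exact hstep

theorem pvInit (w1 : List Char) (hal : ∀ c ∈ w1, pvIsAl c = true) :
    PvInv ((w1 ++ [' ']).foldl pvStepA ([pvNode0], none, none, 0)) [w1] w1 := by
  have hone : ∀ k, pvNodeAt [pvNode0] k = pvNode0 := by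
    intro k
    cases k with
    | zero => rfl
    | succ k => exact pvNodeAt_oob (by simp)
  have hWF0 : PvWF [pvNode0] := by
    refine ⟨by simp, rfl, ?_, ?_⟩
    · intro k; rw [hone k]; exact List.nodup_nil
    · intro i c j hi hg
      rw [hone i] at hg
      exact absurd hg (by simp [pvNode0, PySem.Dict.get?_empty])
  have hnof0 : ∀ t, pvNOf [pvNode0] t = 0 := by
    intro t
    cases t with
    | nil => rfl
    | cons c t =>
        unfold pvNOf
        have : pvPath [pvNode0] 0 (c :: t) = none := by
          simp only [pvPath, hone 0]
          rw [show (pvNode0.children.get? c : Option Nat) = none from rfl]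
        rw [this]
  obtain ⟨a', w2', heq, hWF', hlen', hp2, hpres, hnof⟩ :=
    pvRunWord0 w1 hal [pvNode0] none 0 [] hWF0 rfl
  have hp2' : pvPath a' 0 w1 = some w2' := by simpa using hp2
  obtain ⟨hWF2, hlen2, hnew2, hpres2, hnof2⟩ := pvAdd_spec hWF' ' ' hp2'
  have hfold : (w1 ++ [' ']).foldl pvStepA ([pvNode0], none, none, 0) =
      ((pvAdd a' w2' ' ').1, none, some 0, (pvAdd a' w2' ' ').2) := by
    rw [List.foldl_append, heq]
    simp [pvStepA]
  rw [hfold]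
  refine ⟨hWF2, rfl, hnew2, ?_, ?_⟩
  · intro t
    show pvNOf (pvAdd a' w2' ' ').1 t = _
    rw [hnof2 t, hnof t, hnof0 t]
    simp [pvPairs]
  · show (none : Option Nat) = _
    simp [pvPairs]


-- ===== VERDICT (by name: the statement is the Claim_ definition above) =====
theorem pairmax_spec : Claim_equal_pairmax := by
  unfold Claim_equal_pairmax
  intro text _hdom hpre0
  unfold Pre_pairmax at hpre0
  have hpre : 2 ≤ (pvWords text.toList []).length :=
    ((pvWordsTwo text.toList []).1 rfl).mpr hpre0
  unfold Spec_pairmax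
  -- split the word list
  obtain ⟨w1, rest, hwseq, hrne⟩ :
      ∃ w1 rest, pvWords text.toList [] = w1 :: rest ∧ rest ≠ [] := by
    cases hq : pvWords text.toList [] with
    | nil => rw [hq] at hpre; simp at hpre
    | cons x ys =>
        cases ys with
        | nil => rw [hq] at hpre; simp at hpre
        | cons y t => exact ⟨x, y :: t, rfl, by simp⟩
  have hal := pvWords_al text.toList [] (by simp)
  have hwrap : pvWrapGo text.toList false = (pvWords text.toList []).flatMap (· ++ [' ']) := by
    have h := pvWrap_eq text.toList []
    simpa using h.symm
  -- run A's loop word by word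
  have hInv1 : PvInv ((w1 ++ [' ']).foldl pvStepA ([pvNode0], none, none, 0)) [w1] w1 :=
    pvInit w1 (fun c hc => hal w1 (by rw [hwseq]; simp) c hc)
  have hInv : PvInv ((rest.flatMap (· ++ [' '])).foldl pvStepA
        ((w1 ++ [' ']).foldl pvStepA ([pvNode0], none, none, 0)))
      ([w1] ++ rest) (rest.getLastD w1) :=
    pvRunWords rest (fun u hu c hc => hal u (by rw [hwseq]; simp [hu]) c hc)
      _ [w1] w1 hInv1 (by simp)
  obtain ⟨hwf, hw1c, hw2c, hcntc, hbestc⟩ := hInv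
  -- the pair list is nonempty
  have hpne : pvPairs (w1 :: rest) ≠ [] := by
    refine pvPairs_ne ?_
    cases rest with
    | nil => exact absurd rfl hrne
    | cons y t => simp
  -- the winning pair and its count
  have hBCcnt : (pvSpecFold (pvPairs (w1 :: rest)) [] ([], 0)).2
      = (((pvPairs (w1 :: rest)).count (pvSpecFold (pvPairs (w1 :: rest)) [] ([], 0)).1 : Nat) : Int) := by
    simpa using pvSpecFold_count (pvPairs (w1 :: rest)) [] [] 0 (by simp)
  have hBC1 : 1 ≤ (pvSpecFold (pvPairs (w1 :: rest)) [] ([], 0)).2 :=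
    pvSpecFold_pos _ hpne
  simp only [List.singleton_append] at hcntc hbestc hwf
  -- the best node exists
  obtain ⟨b, hb⟩ : ∃ b, pvPath ((rest.flatMap (· ++ [' '])).foldl pvStepA
        ((w1 ++ [' ']).foldl pvStepA ([pvNode0], none, none, 0))).1 0
      (pvSpecFold (pvPairs (w1 :: rest)) [] ([], 0)).1 = some b := by
    cases hp : pvPath ((rest.flatMap (· ++ [' '])).foldl pvStepA
        ((w1 ++ [' ']).foldl pvStepA ([pvNode0], none, none, 0))).1 0
        (pvSpecFold (pvPairs (w1 :: rest)) [] ([], 0)).1 with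
    | some b => exact ⟨b, rfl⟩
    | none =>
        exfalso
        have h0 := hcntc (pvSpecFold (pvPairs (w1 :: rest)) [] ([], 0)).1
        rw [show pvNOf ((rest.flatMap (· ++ [' '])).foldl pvStepA
            ((w1 ++ [' ']).foldl pvStepA ([pvNode0], none, none, 0))).1
            (pvSpecFold (pvPairs (w1 :: rest)) [] ([], 0)).1 = 0 from by
          unfold pvNOf; rw [hp]] at h0
        omega
  have hbest2 : ((rest.flatMap (· ++ [' '])).foldl pvStepA
      ((w1 ++ [' ']).foldl pvStepA ([pvNode0], none, none, 0))).2.1 = some b := by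
    rw [hbestc, if_neg hpne, hb]
  -- value of A
  have hlenpos : 0 < ((rest.flatMap (· ++ [' '])).foldl pvStepA
      ((w1 ++ [' ']).foldl pvStepA ([pvNode0], none, none, 0))).1.length :=
    List.length_pos_iff.mpr hwf.ne
  have hblt := (pvPath_lt hwf _ 0 b hlenpos hb).2
  have hspell : pvSpell ((rest.flatMap (· ++ [' '])).foldl pvStepA
        ((w1 ++ [' ']).foldl pvStepA ([pvNode0], none, none, 0))).1
      ((rest.flatMap (· ++ [' '])).foldl pvStepA
        ((w1 ++ [' ']).foldl pvStepA ([pvNode0], none, none, 0))).1.length b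
      = (pvSpecFold (pvPairs (w1 :: rest)) [] ([], 0)).1 :=
    pvSpell_correct hwf _ b hb _ hblt
  have hnb : (pvNodeAt ((rest.flatMap (· ++ [' '])).foldl pvStepA
        ((w1 ++ [' ']).foldl pvStepA ([pvNode0], none, none, 0))).1 b).n
      = (pvSpecFold (pvPairs (w1 :: rest)) [] ([], 0)).2 := by
    have h0 := hcntc (pvSpecFold (pvPairs (w1 :: rest)) [] ([], 0)).1
    rw [show pvNOf ((rest.flatMap (· ++ [' '])).foldl pvStepA
        ((w1 ++ [' ']).foldl pvStepA ([pvNode0], none, none, 0))).1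
        (pvSpecFold (pvPairs (w1 :: rest)) [] ([], 0)).1
        = (pvNodeAt ((rest.flatMap (· ++ [' '])).foldl pvStepA
            ((w1 ++ [' ']).foldl pvStepA ([pvNode0], none, none, 0))).1 b).n from by
      unfold pvNOf; rw [hb]] at h0
    rw [h0, ← hBCcnt]
  -- compute A
  have hA : pairmax text = (String.mk (pvSpecFold (pvPairs (w1 :: rest)) [] ([], 0)).1,
      (pvSpecFold (pvPairs (w1 :: rest)) [] ([], 0)).2) := by
    simp only [pairmax]
    rw [hwrap, hwseq, List.flatMap_cons, List.foldl_append, hbest2]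
    show (String.mk (pvSpell ((rest.flatMap (· ++ [' '])).foldl pvStepA
          ((w1 ++ [' ']).foldl pvStepA ([pvNode0], none, none, 0))).1
        ((rest.flatMap (· ++ [' '])).foldl pvStepA
          ((w1 ++ [' ']).foldl pvStepA ([pvNode0], none, none, 0))).1.length b),
      (pvNodeAt ((rest.flatMap (· ++ [' '])).foldl pvStepA
          ((w1 ++ [' ']).foldl pvStepA ([pvNode0], none, none, 0))).1 b).n) = _
    rw [hspell, hnb]
  -- compute B
  have hB : pairmax_alt text = (String.mk (pvSpecFold (pvPairs (w1 :: rest)) [] ([], 0)).1,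
      (pvSpecFold (pvPairs (w1 :: rest)) [] ([], 0)).2) := by
    simp only [pairmax_alt]
    rw [pvTokB_eq text.toList [] [], List.nil_append, hwseq]
    have hfb := pvFoldB ((w1 :: rest).zip (w1 :: rest).tail) PySem.Dict.empty [] [] 0
      (fun t => by simp [PySem.Dict.getD_empty])
    rw [show (((w1 :: rest).zip (w1 :: rest).tail).map pvPairStr)
        = pvPairs (w1 :: rest) from rfl] at hfb
    rw [show (((w1 :: rest).zip (w1 :: rest).tail).foldl pvStepB
        (PySem.Dict.empty, [], 0)).2.1
        = (pvSpecFold (pvPairs (w1 :: rest)) [] ([], 0)).1 from by rw [hfb],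
      show (((w1 :: rest).zip (w1 :: rest).tail).foldl pvStepB
        (PySem.Dict.empty, [], 0)).2.2
        = (pvSpecFold (pvPairs (w1 :: rest)) [] ([], 0)).2 from by rw [hfb]]
  rw [hA, hB]
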